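-- pv_equiv track=rewrite | github.com/rprovine/ai-lead-gen-booking-platform | backend/executive_finder.py | _prioritize_by_title
-- ===== SOURCE A (Python) =====
-- from typing import List, Dict, Optional
--
-- def _prioritize_by_title(executives: List[Dict]) -> List[Dict]:
--     """
--     Sort executives by decision-making power
--     """
--     priority_order = {
--         'ceo': 1, 'chief executive': 1, 'president': 1, 'owner': 1, 'founder': 1,
--         'cto': 2, 'chief technology': 2,
--         'coo': 3, 'chief operating': 3,
--         'cfo': 4, 'chief financial': 4,
--         'vp': 5, 'vice president': 5,
--         'director': 6,
--         'head': 7,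
--         'manager': 8
--     }
--
--     def get_priority(exec):
--         title = exec.get('title', '').lower()
--         for keyword, priority in priority_order.items():
--             if keyword in title:
--                 return priority
--         return 99  # Low priority for unknown titles
--
--     return sorted(executives, key=get_priority)
-- ===== SOURCE B (Python) =====
-- # Cascade of stable partitions over the tier lists (no comparison sort, no priority numbers):
-- # each tier peels off its matching executives in input order; the leftover (unknown titles) come last.
-- _TIERS = [
--     ['ceo', 'chief executive', 'president', 'owner', 'founder'],
--     ['cto', 'chief technology'],
--     ['coo', 'chief operating'],
--     ['cfo', 'chief financial'],
--     ['vp', 'vice president'],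
--     ['director'],
--     ['head'],
--     ['manager'],
-- ]
--
--
-- def _matches(kws, e):
--     title = e.get('title', '').lower()
--     return any(k in title for k in kws)
--
--
-- def _prioritize_by_title(executives):
--     def go(tiers, remaining):
--         if not tiers:
--             return remaining
--         kws = tiers[0]
--         hit = [e for e in remaining if _matches(kws, e)]
--         miss = [e for e in remaining if not _matches(kws, e)]
--         return hit + go(tiers[1:], miss)
--     return go(_TIERS, list(executives))
-- ===== Notes on version B (the rewrite author's own statement) =====
-- stated objective: alternative
-- what changed: Replaces sorted(..., key=get_priority) with a cascade of stable partitions: each tier's keyword list peels off its matching executives in input order (no priority numbers, no comparison sort), and the unmatched leftovers come last.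
import Mathlib
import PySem

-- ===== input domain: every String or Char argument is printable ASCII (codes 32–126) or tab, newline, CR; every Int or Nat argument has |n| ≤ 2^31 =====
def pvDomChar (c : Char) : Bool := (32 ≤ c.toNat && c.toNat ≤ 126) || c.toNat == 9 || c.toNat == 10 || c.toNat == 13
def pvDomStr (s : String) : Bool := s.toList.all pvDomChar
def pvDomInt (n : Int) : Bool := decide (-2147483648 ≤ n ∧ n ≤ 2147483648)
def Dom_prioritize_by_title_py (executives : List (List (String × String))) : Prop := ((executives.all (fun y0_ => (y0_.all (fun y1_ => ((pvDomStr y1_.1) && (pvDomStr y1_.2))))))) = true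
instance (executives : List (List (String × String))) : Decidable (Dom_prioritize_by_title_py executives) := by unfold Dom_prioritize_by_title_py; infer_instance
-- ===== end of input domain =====

-- B replaces the stable comparison sort keyed by a priority number with a cascade of stable
-- partitions: each tier's keyword list peels off its matching executives in input order and
-- the unmatched leftovers come last (alternative decomposition, same cost class).

-- ===== PORT A =====
-- the priority_order dict literal (distinct keys) as an association list in insertion order
def pvPriorityOrder : List (String × Int) :=
  [("ceo", 1), ("chief executive", 1), ("president", 1), ("owner", 1), ("founder", 1),
   ("cto", 2), ("chief technology", 2),
   ("coo", 3), ("chief operating", 3),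
   ("cfo", 4), ("chief financial", 4),
   ("vp", 5), ("vice president", 5),
   ("director", 6),
   ("head", 7),
   ("manager", 8)]

-- the 'for keyword, priority in priority_order.items(): if keyword in title: return priority' loop
def pvScan : List (String × Int) → String → Int
  | [], _ => 99
  | (kw, p) :: rest, title => if PySem.Str.isIn kw title then p else pvScan rest title

-- get_priority(exec): exec.get('title','').lower(), then the keyword scan
def pvGetPriority (e : List (String × String)) : Int :=
  pvScan pvPriorityOrder (PySem.Str.lower ((PySem.Dict.ofList e).getD "title" ""))

def prioritize_by_title_py (executives : List (List (String × String))) : List (List (String × String)) :=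
  PySem.List.sorted executives pvGetPriority false

-- ===== PORT B =====
def pvTiers : List (List String) :=
  [["ceo", "chief executive", "president", "owner", "founder"],
   ["cto", "chief technology"],
   ["coo", "chief operating"],
   ["cfo", "chief financial"],
   ["vp", "vice president"],
   ["director"],
   ["head"],
   ["manager"]]

-- _matches(kws, e): any(k in e.get('title','').lower() for k in kws)
def pvMatches (kws : List String) (e : List (String × String)) : Bool :=
  kws.any (fun k => PySem.Str.isIn k (PySem.Str.lower ((PySem.Dict.ofList e).getD "title" "")))

-- go(tiers, remaining): hit + go(rest, miss), base case returns the leftovers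
def pvGo : List (List String) → List (List (String × String)) → List (List (String × String))
  | [], remaining => remaining
  | kws :: rest, remaining =>
      remaining.filter (fun e => pvMatches kws e)
        ++ pvGo rest (remaining.filter (fun e => !pvMatches kws e))

def prioritize_by_title_py_alt (executives : List (List (String × String))) : List (List (String × String)) :=
  pvGo pvTiers executives

-- ===== PRECONDITION & SPEC =====
def Spec_prioritize_by_title_py (executives : List (List (String × String))) (out : List (List (String × String))) : Prop := out = prioritize_by_title_py_alt executives
instance (executives : List (List (String × String))) (out : List (List (String × String))) : Decidable (Spec_prioritize_by_title_py executives out) := by unfold Spec_prioritize_by_title_py; infer_instance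

-- ===== CLAIM (what is proved, stated in full; the proofs are below) =====
def Claim_equal_prioritize_by_title_py : Prop := ∀ (executives : List (List (String × String))), Dom_prioritize_by_title_py executives → Spec_prioritize_by_title_py executives (prioritize_by_title_py executives)

-- ===== LEMMAS AND PROOFS =====

-- Step 1: A's sort equals the bucket decomposition over the finite priority universe.

theorem insertBy_append_of_not {α : Type} (before : α → α → Bool) (x : α) (A B : List α)
    (h : ∀ a ∈ A, before x a = false) :
    PySem.List.insertBy before x (A ++ B) = A ++ PySem.List.insertBy before x B := by
  induction A with
  | nil => simp
  | cons a t ih =>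
      simp only [List.cons_append, PySem.List.insertBy, h a (by simp)]
      simp only [Bool.false_eq_true, if_false, List.cons.injEq, true_and]
      exact ih (fun a ha => h a (by simp [ha]))

theorem insertBy_of_forall_before {α : Type} (before : α → α → Bool) (x : α) (ys : List α)
    (h : ∀ a ∈ ys, before x a = true) :
    PySem.List.insertBy before x ys = x :: ys := by
  cases ys with
  | nil => rfl
  | cons a t => simp [PySem.List.insertBy, h a (by simp)]

theorem filter_single_eq {α : Type} (key : α → Int) (x : α) (p : Int) (h : key x = p) :
    List.filter (fun e => key e == p) [x] = [x] := by
  simp [h]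

theorem filter_single_ne {α : Type} (key : α → Int) (x : α) (p : Int) (h : key x ≠ p) :
    List.filter (fun e => key e == p) [x] = [] := by
  simp [h]

theorem flatMap_filter_append_of_ne {α : Type} (key : α → Int) (x : α) (xs : List α) (P : List Int)
    (h : ∀ q ∈ P, key x ≠ q) :
    P.flatMap (fun p => (xs ++ [x]).filter (fun e => key e == p))
      = P.flatMap (fun p => xs.filter (fun e => key e == p)) := by
  induction P with
  | nil => rfl
  | cons p P' ih =>
      rw [List.flatMap_cons, List.flatMap_cons, ih (fun q hq => h q (List.mem_cons_of_mem _ hq)),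
        List.filter_append, filter_single_ne key x p (h p (List.mem_cons_self)), List.append_nil]

theorem insertBy_bkts {α : Type} (key : α → Int) (P : List Int) (hP : P.Pairwise (· < ·))
    (x : α) (hx : key x ∈ P) (xs : List α) :
    PySem.List.insertBy (fun a b => decide (key a < key b)) x
        (P.flatMap (fun p => xs.filter (fun e => key e == p)))
      = P.flatMap (fun p => (xs ++ [x]).filter (fun e => key e == p)) := by
  induction P with
  | nil => cases hx
  | cons p P' ih =>
      have hPp : ∀ q ∈ P', p < q := (List.pairwise_cons.mp hP).1
      have hP' : P'.Pairwise (· < ·) := (List.pairwise_cons.mp hP).2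
      have hbucket : ∀ a ∈ xs.filter (fun e => key e == p), key a = p := by
        intro a ha
        exact beq_iff_eq.mp (List.mem_filter.mp ha).2
      by_cases hxp : key x = p
      · -- x lands at the end of bucket p; later buckets are untouched
        have hrest : ∀ q ∈ P', key x ≠ q := by
          intro q hq heq
          have := hPp q hq
          omega
        rw [List.flatMap_cons, List.flatMap_cons, flatMap_filter_append_of_ne key x xs P' hrest,
          List.filter_append, filter_single_eq key x p hxp]
        rw [insertBy_append_of_not _ x _ _ (by
          intro a ha
          have hk := hbucket a ha
          simp only [decide_eq_false_iff_not, not_lt, hk, hxp]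
          omega)]
        rw [insertBy_of_forall_before _ x _ (by
          intro a ha
          rcases List.mem_flatMap.mp ha with ⟨q, hq, haq⟩
          have hkq : key a = q := beq_iff_eq.mp (List.mem_filter.mp haq).2
          simp only [decide_eq_true_eq, hkq, hxp]
          exact hPp q hq)]
        simp
      · -- x belongs to a later bucket
        have hx' : key x ∈ P' := by
          rcases List.mem_cons.mp hx with h | h
          · exact absurd h hxp
          · exact h
        have hgt : p < key x := hPp _ hx'
        rw [List.flatMap_cons, List.flatMap_cons, List.filter_append,
          filter_single_ne key x p hxp, List.append_nil]
        rw [insertBy_append_of_not _ x _ _ (by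
          intro a ha
          have hk := hbucket a ha
          simp only [decide_eq_false_iff_not, not_lt, hk]
          omega)]
        rw [ih hP' hx']

theorem sorted_eq_bkts {α : Type} (key : α → Int) (P : List Int) (hP : P.Pairwise (· < ·))
    (xs : List α) (hcov : ∀ e ∈ xs, key e ∈ P) :
    PySem.List.sorted xs key false = P.flatMap (fun p => xs.filter (fun e => key e == p)) := by
  induction xs using List.reverseRecOn with
  | nil => simp [PySem.List.sorted]
  | append_singleton xs x ih =>
      rw [PySem.List.sorted_eq_foldl_insertBy] at *
      rw [List.foldl_append, List.foldl_cons, List.foldl_nil]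
      rw [ih (fun e he => hcov e (by simp [he]))]
      exact insertBy_bkts key P hP x (hcov x (by simp)) xs

-- Step 2: the tier cascade equals the same bucket decomposition.

-- the keyword table regrouped as (priority, tier keywords) pairs
def pvTiersP : List (Int × List String) :=
  [(1, ["ceo", "chief executive", "president", "owner", "founder"]),
   (2, ["cto", "chief technology"]),
   (3, ["coo", "chief operating"]),
   (4, ["cfo", "chief financial"]),
   (5, ["vp", "vice president"]),
   (6, ["director"]),
   (7, ["head"]),
   (8, ["manager"])]

def pvFlat (ts : List (Int × List String)) : List (String × Int) :=
  ts.flatMap (fun vk => vk.2.map (fun k => (k, vk.1)))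

def pvKeyT (ts : List (Int × List String)) (e : List (String × String)) : Int :=
  pvScan (pvFlat ts) (PySem.Str.lower ((PySem.Dict.ofList e).getD "title" ""))

theorem pvScan_map_append (kws : List String) (v : Int) (rest : List (String × Int)) (t : String) :
    pvScan (kws.map (fun k => (k, v)) ++ rest) t
      = if kws.any (fun k => PySem.Str.isIn k t) then v else pvScan rest t := by
  induction kws with
  | nil => simp
  | cons k kws' ih =>
      rw [List.map_cons, List.cons_append, List.any_cons,
        show pvScan ((k, v) :: (kws'.map (fun k => (k, v)) ++ rest)) t
          = if PySem.Str.isIn k t then v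
            else pvScan (kws'.map (fun k => (k, v)) ++ rest) t from rfl, ih]
      cases h : PySem.Str.isIn k t
      · simp only [Bool.false_eq_true, if_false, Bool.false_or]
      · simp only [Bool.true_or, if_true]

theorem pvKeyT_cons (v : Int) (kws : List String) (rest : List (Int × List String))
    (e : List (String × String)) :
    pvKeyT ((v, kws) :: rest) e = if pvMatches kws e then v else pvKeyT rest e := by
  unfold pvKeyT pvFlat pvMatches
  rw [List.flatMap_cons, pvScan_map_append]

theorem pvKeyT_cases (ts : List (Int × List String)) (e : List (String × String)) :
    pvKeyT ts e = 99 ∨ pvKeyT ts e ∈ ts.map Prod.fst := by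
  induction ts with
  | nil => left; rfl
  | cons vk rest ih =>
      obtain ⟨v, kws⟩ := vk
      rw [pvKeyT_cons]
      by_cases h : pvMatches kws e
      · right; simp [h]
      · rw [if_neg h]
        rcases ih with h99 | hmem
        · left; exact h99
        · right; exact List.mem_cons_of_mem _ hmem

theorem flatMap_congr_mem {α β : Type} (P : List α) (f g : α → List β)
    (h : ∀ q ∈ P, f q = g q) : P.flatMap f = P.flatMap g := by
  induction P with
  | nil => rfl
  | cons p P' ih =>
      rw [List.flatMap_cons, List.flatMap_cons, h p (by simp),
        ih (fun q hq => h q (List.mem_cons_of_mem _ hq))]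

theorem pvGo_eq_bkts (ts : List (Int × List String))
    (hnd : (ts.map Prod.fst).Nodup) (h99 : ∀ v ∈ ts.map Prod.fst, v ≠ 99)
    (xs : List (List (String × String))) :
    pvGo (ts.map Prod.snd) xs
      = (ts.map Prod.fst ++ [99]).flatMap (fun p => xs.filter (fun e => pvKeyT ts e == p)) := by
  induction ts generalizing xs with
  | nil =>
      simp only [List.map_nil, List.nil_append, List.flatMap_cons, List.flatMap_nil,
        List.append_nil, pvGo]
      rw [List.filter_eq_self.mpr]
      intro e _
      simp [pvKeyT, pvFlat, pvScan]
  | cons vk rest ih =>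
      obtain ⟨v, kws⟩ := vk
      have hv_not : v ∉ rest.map Prod.fst := (List.nodup_cons.mp hnd).1
      have hv99 : v ≠ 99 := h99 v (by simp)
      have hnd' : (rest.map Prod.fst).Nodup := (List.nodup_cons.mp hnd).2
      have h99' : ∀ q ∈ rest.map Prod.fst, q ≠ 99 :=
        fun q hq => h99 q (List.mem_cons_of_mem _ hq)
      simp only [List.map_cons, List.cons_append, List.flatMap_cons, pvGo]
      congr 1
      · -- head bucket: matching ↔ key = v
        apply List.filter_congr
        intro e _
        rw [pvKeyT_cons]
        by_cases h : pvMatches kws e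
        · simp [h]
        · simp only [h, if_false, Bool.false_eq_true]
          rcases pvKeyT_cases rest e with h99k | hmem
          · simp [h99k, hv99.symm]
          · have : pvKeyT rest e ≠ v := fun hc => hv_not (hc ▸ hmem)
            simp [this]
      · -- tail buckets over the miss list
        rw [ih hnd' h99']
        apply flatMap_congr_mem
        intro q hq
        have hqv : q ≠ v := by
          rcases List.mem_append.mp hq with h | h
          · exact fun hc => hv_not (hc ▸ h)
          · simp only [List.mem_singleton] at h
            exact fun hc => hv99 (hc.symm.trans h)
        rw [List.filter_filter]
        apply List.filter_congr
        intro e _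
        rw [pvKeyT_cons]
        by_cases h : pvMatches kws e
        · simp [h, hqv.symm]
        · simp [h]

-- instantiation facts (pure literal computations)
theorem pvTiers_eq : pvTiers = pvTiersP.map Prod.snd := by decide
theorem pvKeyT_tiersP (e : List (String × String)) : pvKeyT pvTiersP e = pvGetPriority e := rfl
theorem pvPriorities_eq : pvTiersP.map Prod.fst ++ [99] = [1, 2, 3, 4, 5, 6, 7, 8, 99] := by decide

-- ===== VERDICT (by name: the statement is the Claim_ definition above) =====
theorem prioritize_by_title_py_spec : Claim_equal_prioritize_by_title_py := by
  intro executives _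
  unfold Spec_prioritize_by_title_py prioritize_by_title_py prioritize_by_title_py_alt
  rw [pvTiers_eq, pvGo_eq_bkts pvTiersP (by decide) (by decide)]
  rw [sorted_eq_bkts pvGetPriority (pvTiersP.map Prod.fst ++ [99])
    (by rw [pvPriorities_eq]; decide) executives
    (fun e _ => by
      rcases pvKeyT_cases pvTiersP e with h | h
      · rw [← pvKeyT_tiersP, h]; simp
      · rw [← pvKeyT_tiersP]; exact List.mem_append_left _ h)]
  exact flatMap_congr_mem _ _ _ (fun q _ =>
    List.filter_congr (fun e _ => by rw [pvKeyT_tiersP]))
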